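-- pv_equiv track=rewrite | github.com/FailedFeather37/Machine_Learning_Groupe | init_data.py | cible_somme
-- ===== SOURCE A (Python) =====
-- def liste_tuple(liste, taille_tuple):
--     liste_de_tuples = []
--     for i in range(0, len(liste), taille_tuple):
--         sous_liste = liste[i:i + taille_tuple]
--         tuple_courant = tuple(sous_liste)
--         liste_de_tuples.append(tuple_courant)
--     return liste_de_tuples
--
-- def cible_somme(liste_cible):
--     cible=[]
--     compt1=0
--     compt0=0
--     liste_cible=liste_tuple(liste_cible,2)
--     for i in liste_cible:
--         if i[0]+i[1]==2:
--             cible.append(1)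
--             compt1+=1
--         else:
--             cible.append(0)
--             compt0+=1
--     return cible
-- ===== SOURCE B (Python) =====
-- def cible_somme(liste_cible):
--     # Direct index scan, step 2; liste_cible[i + 1] raises IndexError on odd
--     # length exactly as the original does.
--     return [1 if liste_cible[i] + liste_cible[i + 1] == 2 else 0
--             for i in range(0, len(liste_cible), 2)]
-- ===== Notes on version B (the rewrite author's own statement) =====
-- stated objective: simpler
-- what changed: Replaces the helper that materialises an intermediate list of 2-tuples plus a fold with dead counters by a single direct index comprehension over range(0, len, 2).
import Mathlib
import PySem

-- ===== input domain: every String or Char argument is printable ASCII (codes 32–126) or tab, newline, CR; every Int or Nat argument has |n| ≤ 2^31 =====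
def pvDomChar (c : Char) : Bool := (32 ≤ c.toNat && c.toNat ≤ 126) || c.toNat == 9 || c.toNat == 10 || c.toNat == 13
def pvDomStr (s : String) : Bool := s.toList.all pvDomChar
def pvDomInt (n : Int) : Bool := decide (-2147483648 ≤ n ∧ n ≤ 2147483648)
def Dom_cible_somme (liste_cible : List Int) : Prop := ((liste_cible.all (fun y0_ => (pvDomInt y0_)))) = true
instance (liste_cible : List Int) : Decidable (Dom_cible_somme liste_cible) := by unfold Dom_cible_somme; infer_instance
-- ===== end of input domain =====

-- B replaces A's intermediate list of 2-tuples and its fold with dead counters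
-- by a single direct index map over range(0, len, 2); objective: simpler.


-- ===== PORT A =====
-- helper liste_tuple: 2-tuples become (possibly shorter) sublists, a tuple of
-- variable arity has no fixed Lean product type
def pvListeTuple (liste : List Int) (taille_tuple : Int) : List (List Int) :=
  (PySem.List.pyRange 0 liste.length taille_tuple).foldl
    (fun liste_de_tuples i =>
      liste_de_tuples ++ [PySem.List.slice liste (some i) (some (i + taille_tuple))]) []

-- i[0] / i[1]: pyGetD's default 0 is only reached where Python raises
-- IndexError (odd-length input), which Pre_cible_somme excludes
def cible_somme (liste_cible : List Int) : List Int :=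
  let pairs := pvListeTuple liste_cible 2
  let s := pairs.foldl
    (fun (st : List Int × Int × Int) i =>
      if PySem.List.pyGetD i 0 0 + PySem.List.pyGetD i 1 0 = 2 then
        (st.1 ++ [1], st.2.1 + 1, st.2.2)
      else
        (st.1 ++ [0], st.2.1, st.2.2 + 1)) ([], 0, 0)
  s.1

-- ===== PORT B =====
-- pyGetD's default 0 is only reached where Python raises IndexError
-- (odd-length input), which Pre_cible_somme excludes
def cible_somme_alt (liste_cible : List Int) : List Int :=
  (PySem.List.pyRange 0 liste_cible.length 2).map
    (fun i =>
      if PySem.List.pyGetD liste_cible i 0 + PySem.List.pyGetD liste_cible (i + 1) 0 = 2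
      then 1 else 0)

-- ===== PRECONDITION & SPEC =====
-- Pre_ excludes odd-length input, on which both Pythons raise IndexError
def Pre_cible_somme (liste_cible : List Int) : Prop := liste_cible.length % 2 = 0
instance (liste_cible : List Int) : Decidable (Pre_cible_somme liste_cible) := by
  unfold Pre_cible_somme; infer_instance

def pvWitness_cible_somme : List Int := [1, 1, 0, 2]

def Spec_cible_somme (liste_cible : List Int) (out : List Int) : Prop := out = cible_somme_alt liste_cible
instance (liste_cible : List Int) (out : List Int) : Decidable (Spec_cible_somme liste_cible out) := by unfold Spec_cible_somme; infer_instance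

-- ===== CLAIM (what is proved, stated in full; the proofs are below) =====
def Claim_equal_cible_somme : Prop := ∀ (liste_cible : List Int), Dom_cible_somme liste_cible → Pre_cible_somme liste_cible → Spec_cible_somme liste_cible (cible_somme liste_cible)

-- ===== LEMMAS AND PROOFS =====

-- the dead counters do not influence the collected list
theorem pv_fold_fst (cond : List Int → Prop) [DecidablePred cond] (l : List (List Int))
    (acc : List Int) (c1 c0 : Int) :
    (l.foldl (fun (st : List Int × Int × Int) i =>
        if cond i then (st.1 ++ [1], st.2.1 + 1, st.2.2)
        else (st.1 ++ [0], st.2.1, st.2.2 + 1)) (acc, c1, c0)).1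
      = l.foldl (fun a i => a ++ [if cond i then 1 else 0]) acc := by
  induction l generalizing acc c1 c0 with
  | nil => rfl
  | cons h t ih =>
    by_cases hc : cond h <;> simp [hc, ih]

theorem cible_somme_spec : Claim_equal_cible_somme := by
  intro l _ hpre
  unfold Pre_cible_somme at hpre
  unfold Spec_cible_somme cible_somme cible_somme_alt pvListeTuple
  dsimp only
  rw [PySem.List.foldl_append_singleton_eq_map]
  rw [pv_fold_fst (fun i => PySem.List.pyGetD i 0 0 + PySem.List.pyGetD i 1 0 = 2)]
  simp only [PySem.List.foldl_append_singleton_eq_map, List.nil_append, List.map_map]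
  rw [PySem.List.pyRange_of_pos 0 (l.length : Int) (by norm_num)]
  rw [List.map_map, List.map_map]
  apply List.map_congr_left
  intro k hk
  rw [List.mem_range] at hk
  -- bounds: the range has ⌈n/2⌉ entries, so 2k+1 < n since n is even
  have hcount : ∀ m, m ∈ List.range (if (0:Int) < (l.length : Int)
      then (((l.length : Int) - 0 + 2 - 1) / 2).toNat else 0) → 2 * m + 1 < l.length := by
    intro m hm
    rw [List.mem_range] at hm
    split at hm <;> omega
  have hk2 : 2 * k + 1 < l.length := hcount k (List.mem_range.mpr hk)
  simp only [Function.comp_apply, zero_add]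
  have h2k : (2 : Int) * (k : Int) = ((2 * k : Nat) : Int) := by push_cast; ring
  have hslc : PySem.List.slice l (some ((2 : Int) * k)) (some ((2 : Int) * k + 2))
      = (l.drop (2 * k)).take 2 := by
    rw [h2k]
    have : ((2 * k : Nat) : Int) + 2 = ((2 * k : Nat) : Int) + ((2 : Nat) : Int) := by
      push_cast; ring
    rw [this, PySem.List.slice_natCast_add]
  rw [hslc]
  have htake : (l.drop (2 * k)).take 2 = [l[2 * k], l[2 * k + 1]] := by
    have h1 : 2 * k < l.length := by omega
    rw [List.drop_eq_getElem_cons h1, List.drop_eq_getElem_cons hk2]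
    rfl
  rw [htake]
  have hg0 : PySem.List.pyGetD [l[2 * k], l[2 * k + 1]] 0 0 = l[2 * k] := by
    simp [PySem.List.pyGetD, PySem.List.pyGet?, PySem.List.pyIdx?]
  have hg1 : PySem.List.pyGetD [l[2 * k], l[2 * k + 1]] 1 0 = l[2 * k + 1] := by
    simp [PySem.List.pyGetD, PySem.List.pyGet?, PySem.List.pyIdx?]
  have hgl0 : PySem.List.pyGetD l ((2 : Int) * k) 0 = l[2 * k] := by
    rw [h2k, PySem.List.pyGetD_natCast]
    simp [List.getD_eq_getElem?_getD, List.getElem?_eq_getElem (by omega : 2 * k < l.length)]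
  have hgl1 : PySem.List.pyGetD l ((2 : Int) * k + 1) 0 = l[2 * k + 1] := by
    have : (2 : Int) * (k : Int) + 1 = ((2 * k + 1 : Nat) : Int) := by push_cast; ring
    rw [this, PySem.List.pyGetD_natCast]
    simp [List.getD_eq_getElem?_getD, List.getElem?_eq_getElem hk2]
  rw [hg0, hg1, hgl0, hgl1]
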